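-- pv_equiv track=rewrite | github.com/yamamotoeigo/consideration_of_computer_power | src/block_division_func.py | get_positive_min
-- ===== SOURCE A (Python) =====
-- def get_positive_min(lst: list, used_pcs: list) -> int:
--     """リストから0より大きい最小値を取得
--
--     Args:
--         lst (_type_): 探索対象のリスト
--
--     Returns:
--         _type_: 最小値
--     """
--     positive_values = [(i, x) for i, x in enumerate(lst) if x > 0 and i not in used_pcs]
--     if positive_values:
--         sorted_values = sorted(positive_values, key=lambda x: x[1])
--         min_index, _ = sorted_values[0]
--         return min_index
--     else:
--         return None
-- ===== SOURCE B (Python) =====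
-- def get_positive_min(lst: list, used_pcs: list) -> int:
--     best_index = None
--     best_val = None
--     for i, x in enumerate(lst):
--         if x > 0 and i not in used_pcs:
--             if best_val is None or x < best_val:
--                 best_val = x
--                 best_index = i
--     return best_index
-- ===== Notes on version B (the rewrite author's own statement) =====
-- stated objective: simpler
-- what changed: Replaced A's build-filter-then-stable-sort-then-take-first pipeline with a single enumerate pass that keeps the first strict minimum (best_index/best_val accumulator), preserving the stable sort's tie-breaking via strict '<'.
import Mathlib
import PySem

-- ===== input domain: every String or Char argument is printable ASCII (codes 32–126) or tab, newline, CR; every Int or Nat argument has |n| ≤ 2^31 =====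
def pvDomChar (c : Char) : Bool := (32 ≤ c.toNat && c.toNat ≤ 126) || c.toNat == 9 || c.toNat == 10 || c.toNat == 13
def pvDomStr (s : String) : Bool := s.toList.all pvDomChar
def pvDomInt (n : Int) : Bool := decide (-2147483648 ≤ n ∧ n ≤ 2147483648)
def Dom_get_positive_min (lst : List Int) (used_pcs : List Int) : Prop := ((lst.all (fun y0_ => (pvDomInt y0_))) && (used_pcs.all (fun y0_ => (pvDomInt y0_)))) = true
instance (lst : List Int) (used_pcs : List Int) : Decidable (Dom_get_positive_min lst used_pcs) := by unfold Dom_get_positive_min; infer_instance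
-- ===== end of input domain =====

-- B replaces A's build-filter-sort-take-head with one linear pass keeping the first
-- strict minimum (objective: simpler; a different algorithm of similar cost).

-- ===== PORT A =====
def get_positive_min (lst : List Int) (used_pcs : List Int) : Option Int :=
  let positive_values :=
    (PySem.List.enumerate lst).filter
      (fun p => decide (p.2 > 0) && !(used_pcs.contains p.1))
  if positive_values ≠ [] then
    match PySem.List.sorted positive_values (fun p => p.2) false with
    | (min_index, _) :: _ => some min_index
    | [] => none
  else none

-- ===== PORT B =====
def get_positive_min_alt (lst : List Int) (used_pcs : List Int) : Option Int :=
  let st :=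
    (PySem.List.enumerate lst).foldl
      (fun st p =>
        if p.2 > 0 ∧ p.1 ∉ used_pcs then
          match st.2 with
          | none => (some p.1, some p.2)
          | some v => if p.2 < v then (some p.1, some p.2) else st
        else st)
      ((none, none) : Option Int × Option Int)
  st.1

-- ===== PRECONDITION & SPEC =====
def Spec_get_positive_min (lst : List Int) (used_pcs : List Int) (out : Option Int) : Prop := out = get_positive_min_alt lst used_pcs
instance (lst : List Int) (used_pcs : List Int) (out : Option Int) : Decidable (Spec_get_positive_min lst used_pcs out) := by unfold Spec_get_positive_min; infer_instance

-- ===== CLAIM (what is proved, stated in full; the proofs are below) =====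
def Claim_equal_get_positive_min : Prop := ∀ (lst : List Int) (used_pcs : List Int), Dom_get_positive_min lst used_pcs → Spec_get_positive_min lst used_pcs (get_positive_min lst used_pcs)

-- ===== LEMMAS AND PROOFS =====

-- B's loop step once the filter condition has been split off (what the loop does on kept pairs)
def pvStep (st : Option Int × Option Int) (p : Int × Int) : Option Int × Option Int :=
  match st.2 with
  | none => (some p.1, some p.2)
  | some v => if p.2 < v then (some p.1, some p.2) else st

-- the (best_index, best_val) view of a list's head
def pvHeadSt (acc : List (Int × Int)) : Option Int × Option Int :=
  match acc with
  | [] => (none, none)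
  | q :: _ => (some q.1, some q.2)

theorem pvHeadSt_insertBy (x : Int × Int) (acc : List (Int × Int)) :
    pvHeadSt (PySem.List.insertBy (fun a b : Int × Int => decide (a.2 < b.2)) x acc)
      = pvStep (pvHeadSt acc) x := by
  cases acc with
  | nil => simp [PySem.List.insertBy, pvHeadSt, pvStep]
  | cons y t =>
    by_cases h : x.2 < y.2 <;>
      simp [PySem.List.insertBy, pvHeadSt, pvStep, h]

theorem pvHeadSt_foldl (pv : List (Int × Int)) :
    ∀ acc : List (Int × Int),
      pvHeadSt (pv.foldl (fun acc x => PySem.List.insertBy (fun a b : Int × Int => decide (a.2 < b.2)) x acc) acc)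
        = pv.foldl pvStep (pvHeadSt acc) := by
  induction pv with
  | nil => intro acc; simp
  | cons p t ih =>
    intro acc
    simp only [List.foldl_cons, ih, pvHeadSt_insertBy]

-- head of the stable sort (keyed by the value) = the first-strict-minimum loop
theorem pvSorted_head (pv : List (Int × Int)) :
    pvHeadSt (PySem.List.sorted pv (fun p => p.2) false) = pv.foldl pvStep (none, none) := by
  rw [PySem.List.sorted_eq_foldl_insertBy]
  simpa using pvHeadSt_foldl pv []

theorem pvCond_eq (used_pcs : List Int) (p : Int × Int) :
    (p.2 > 0 ∧ p.1 ∉ used_pcs) ↔ (decide (p.2 > 0) && !(used_pcs.contains p.1)) = true := by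
  simp

-- ===== VERDICT (by name: the statement is the Claim_ definition above) =====
theorem get_positive_min_spec : Claim_equal_get_positive_min := by
  intro lst used_pcs _
  unfold Spec_get_positive_min get_positive_min get_positive_min_alt
  have hfold :
      (PySem.List.enumerate lst).foldl
        (fun st p =>
          if p.2 > 0 ∧ p.1 ∉ used_pcs then
            match st.2 with
            | none => (some p.1, some p.2)
            | some v => if p.2 < v then (some p.1, some p.2) else st
          else st)
        ((none, none) : Option Int × Option Int)
      = ((PySem.List.enumerate lst).filter
          (fun p => decide (p.2 > 0) && !(used_pcs.contains p.1))).foldl pvStep (none, none) := by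
    rw [List.foldl_filter]
    congr 1
    funext st p
    by_cases h : p.2 > 0 ∧ p.1 ∉ used_pcs
    · rw [if_pos h, if_pos ((pvCond_eq used_pcs p).mp h)]; rfl
    · rw [if_neg h, if_neg (fun hc => h ((pvCond_eq used_pcs p).mpr hc))]
  simp only [hfold]
  set pv := (PySem.List.enumerate lst).filter
      (fun p => decide (p.2 > 0) && !(used_pcs.contains p.1)) with hpv
  rw [← pvSorted_head]
  by_cases hne : pv ≠ []
  · rw [if_pos hne]
    cases hs : PySem.List.sorted pv (fun p => p.2) false with
    | nil => exact absurd ((PySem.List.sorted_eq_nil_iff pv _ false).mp hs) hne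
    | cons q t => simp [pvHeadSt]
  · rw [if_neg hne]
    have hnil : pv = [] := by
      by_contra h; exact hne h
    rw [hnil]
    simp [PySem.List.sorted, pvHeadSt]
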